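-- pv_equiv track=rewrite | github.com/ofirm57/python-Intro | ex8/zevel.py | common_cases
-- ===== SOURCE A (Python) =====
-- def common_cases(row, block):
--     """
--     recive row and block and return common_cases
--     """
--     row_long = len(row)
--     num_of_black = sum(block)
--     block_length = len(block)
--     lst = []
--     if num_of_black + len(block) - 1 == row_long:
--         for i, value in enumerate(block):
--             lst.extend([BLACK] * value)
--             if i != block_length - 1:
--                 lst.append(WHITE)
--         return lst
--     if not block: ### zero row
--         return lst.extend([WHITE] * row_long)
--     if block_length == 1 and num_of_black == row_long:  ## all black
--         return lst.extend([BLACK] * row_long)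
--
-- BLACK = 1
--
-- WHITE = 0
-- ===== SOURCE B (Python) =====
-- BLACK = 1
--
-- WHITE = 0
--
--
-- def common_cases(row, block):
--     if sum(block) + len(block) - 1 != len(row):
--         return None
--     return _pattern(block)
--
--
-- def _pattern(block):
--     if not block:
--         return []
--     if len(block) == 1:
--         return [BLACK] * block[0]
--     return [BLACK] * block[0] + [WHITE] + _pattern(block[1:])
-- ===== Notes on version B (the rewrite author's own statement) =====
-- stated objective: simpler
-- what changed: A interleaves an indexed for-loop (enumerate with a last-index test) with dead extend-returning branches; B is a single guard on the length equation plus a structural recursion that emits each block and one separator, returning None otherwise.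
import Mathlib
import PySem

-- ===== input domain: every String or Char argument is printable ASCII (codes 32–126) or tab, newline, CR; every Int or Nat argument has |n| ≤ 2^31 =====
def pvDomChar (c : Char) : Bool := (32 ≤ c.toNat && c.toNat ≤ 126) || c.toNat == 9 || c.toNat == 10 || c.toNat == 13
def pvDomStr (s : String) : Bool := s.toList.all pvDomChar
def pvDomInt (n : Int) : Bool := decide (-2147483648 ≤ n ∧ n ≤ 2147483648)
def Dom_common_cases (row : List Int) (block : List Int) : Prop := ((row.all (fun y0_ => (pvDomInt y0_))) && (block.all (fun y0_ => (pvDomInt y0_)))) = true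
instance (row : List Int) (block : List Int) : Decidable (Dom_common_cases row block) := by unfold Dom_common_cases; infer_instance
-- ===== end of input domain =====

-- B replaces A's indexed loop and dead branches with a guard plus a structural recursion (simpler); equivalence is total.

-- ===== PORT A =====
def common_cases (row : List Int) (block : List Int) : Option (List Int) :=
  let row_long : Int := row.length
  let num_of_black : Int := block.sum
  let block_length : Int := block.length
  let lst : List Int := []
  if num_of_black + (block.length : Int) - 1 == row_long then
    some ((PySem.List.enumerate block).foldl (fun lst iv =>
      let lst := lst ++ PySem.List.pyRepeat [1] iv.2
      if iv.1 != block_length - 1 then lst ++ [0] else lst) lst)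
  else if block.isEmpty then
    none  -- return lst.extend(...) is None
  else if block_length == 1 && num_of_black == row_long then
    none  -- return lst.extend(...) is None
  else
    none  -- implicit fall-through

-- ===== PORT B =====
def pattern_alt : List Int → List Int
  | [] => []
  | [b] => PySem.List.pyRepeat [1] b
  | b :: rest => PySem.List.pyRepeat [1] b ++ [0] ++ pattern_alt rest

def common_cases_alt (row : List Int) (block : List Int) : Option (List Int) :=
  if block.sum + (block.length : Int) - 1 != (row.length : Int) then
    none
  else
    some (pattern_alt block)

-- ===== PRECONDITION & SPEC =====
def Spec_common_cases (row : List Int) (block : List Int) (out : Option (List Int)) : Prop := out = common_cases_alt row block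
instance (row : List Int) (block : List Int) (out : Option (List Int)) : Decidable (Spec_common_cases row block out) := by unfold Spec_common_cases; infer_instance

-- ===== CLAIM (what is proved, stated in full; the proofs are below) =====
def Claim_equal_common_cases : Prop := ∀ (row : List Int) (block : List Int), Dom_common_cases row block → Spec_common_cases row block (common_cases row block)

-- ===== LEMMAS AND PROOFS =====

-- A's loop over `enumerate block s`, testing the running index against L = s + len(block) - 1,
-- appends exactly B's recursive pattern to the accumulator.
theorem loopA_eq_pattern (block : List Int) : ∀ (s L : Int) (acc : List Int),
    L = s + block.length - 1 →
    (PySem.List.enumerate block s).foldl (fun lst iv =>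
      let lst := lst ++ PySem.List.pyRepeat [1] iv.2
      if iv.1 != L then lst ++ [0] else lst) acc = acc ++ pattern_alt block := by
  induction block with
  | nil => intro s L acc hL; simp [PySem.List.enumerate_nil, pattern_alt]
  | cons b rest ih =>
    intro s L acc hL
    cases rest with
    | nil =>
      simp only [List.length_cons, List.length_nil] at hL
      have hs : L = s := by omega
      simp [PySem.List.enumerate_cons, PySem.List.enumerate_nil, pattern_alt, hs]
    | cons c t =>
      have hne : (s != L) = true := by
        simp only [List.length_cons] at hL
        simp only [bne_iff_ne, ne_eq]
        push_cast at hL; omega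
      rw [PySem.List.enumerate_cons, List.foldl_cons]
      simp only [hne]
      rw [ih (s + 1) L _ (by simp only [List.length_cons] at hL ⊢; push_cast at hL ⊢; omega)]
      simp [pattern_alt, List.append_assoc]

-- ===== VERDICT (by name: the statement is the Claim_ definition above) =====
theorem common_cases_spec : Claim_equal_common_cases := by
  unfold Claim_equal_common_cases
  intro row block _
  unfold Spec_common_cases common_cases common_cases_alt
  by_cases h : block.sum + (block.length : Int) - 1 = (row.length : Int)
  · simp only [h, BEq.rfl, if_pos, bne_self_eq_false, Bool.false_eq_true, if_false]
    rw [loopA_eq_pattern block 0 ((block.length : Int) - 1) [] (by omega)]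
    simp
  · have h1 : ((block.sum + (block.length : Int) - 1 == (row.length : Int)) = false) := by
      simp [h]
    have h2 : ((block.sum + (block.length : Int) - 1 != (row.length : Int)) = true) := by
      simp [h]
    simp only [h1, h2, Bool.false_eq_true, if_false]
    split <;> first | rfl | (split <;> rfl)
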